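-- pv_equiv track=rewrite | github.com/me-dev52/Isro_MosdacAI | mosdac/src/geospatial/spatial_processor.py | get_spatial_suggestions
-- ===== SOURCE A (Python) =====
-- from typing import Dict, List, Any, Optional, Tuple, Union
--
-- def get_spatial_suggestions(query: str) -> List[str]:
--     """
--     Get spatial query suggestions
--
--     Args:
--         query: User query
--
--     Returns:
--         List of suggested spatial queries
--     """
--     suggestions = [
--         "Show satellite data for Mumbai region",
--         "What data is available around Delhi?",
--         "Show coverage within 50km of Bangalore",
--         "What satellite imagery covers Chennai area?",
--         "Show data availability for coordinates 77.2090, 28.7041",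
--         "What's the coverage area for Kolkata region?"
--     ]
--
--     # Filter suggestions based on query content
--     query_lower = query.lower()
--     relevant_suggestions = []
--
--     for suggestion in suggestions:
--         if any(word in query_lower for word in suggestion.lower().split()):
--             relevant_suggestions.append(suggestion)
--
--     # Add general suggestions if not enough specific ones
--     while len(relevant_suggestions) < 3:
--         for suggestion in suggestions:
--             if suggestion not in relevant_suggestions:
--                 relevant_suggestions.append(suggestion)
--                 break
--
--     return relevant_suggestions[:3]
-- ===== SOURCE B (Python) =====
-- def get_spatial_suggestions(query: str) -> list:
--     """Partition the fixed suggestion list by the match predicate, then take the first three."""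
--     suggestions = [
--         "Show satellite data for Mumbai region",
--         "What data is available around Delhi?",
--         "Show coverage within 50km of Bangalore",
--         "What satellite imagery covers Chennai area?",
--         "Show data availability for coordinates 77.2090, 28.7041",
--         "What's the coverage area for Kolkata region?"
--     ]
--     query_lower = query.lower()
--
--     def matches(s):
--         return any(word in query_lower for word in s.lower().split())
--
--     matched = [s for s in suggestions if matches(s)]
--     unmatched = [s for s in suggestions if not matches(s)]
--     return (matched + unmatched)[:3]
-- ===== Notes on version B (the rewrite author's own statement) =====
-- stated objective: simpler
-- what changed: Replaces the pad-by-rescanning while/for/break loop with a single partition into matched and unmatched comprehensions, returning (matched + unmatched)[:3].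
import Mathlib
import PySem

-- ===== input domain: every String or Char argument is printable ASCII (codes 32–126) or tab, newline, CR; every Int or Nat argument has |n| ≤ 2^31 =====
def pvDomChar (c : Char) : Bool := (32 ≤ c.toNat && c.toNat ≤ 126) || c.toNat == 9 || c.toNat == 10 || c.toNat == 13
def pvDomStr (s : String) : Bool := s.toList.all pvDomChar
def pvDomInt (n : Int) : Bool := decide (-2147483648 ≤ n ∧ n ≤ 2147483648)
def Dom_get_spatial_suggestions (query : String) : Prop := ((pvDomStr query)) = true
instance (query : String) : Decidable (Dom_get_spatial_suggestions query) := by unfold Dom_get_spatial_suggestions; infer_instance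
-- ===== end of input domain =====

-- B replaces A's pad-by-rescanning while/for/break loop with one partition into
-- matched/unmatched comprehensions and a concatenate-then-take-3 (objective: simpler).


-- ===== PORT A =====
-- the fixed suggestion list (shared literal data of both Pythons)
def pvSuggs : List String :=
  [ "Show satellite data for Mumbai region",
    "What data is available around Delhi?",
    "Show coverage within 50km of Bangalore",
    "What satellite imagery covers Chennai area?",
    "Show data availability for coordinates 77.2090, 28.7041",
    "What's the coverage area for Kolkata region?" ]

-- any(word in query_lower for word in suggestion.lower().split())
def pvMatch (query_lower : String) (s : String) : Bool :=
  (PySem.Str.split₀ (PySem.Str.lower s)).any (fun w => PySem.Str.isIn w query_lower)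

-- inner 'for suggestion in suggestions: if suggestion not in rel: append; break'
def pvPadOnce : List String → List String → List String
  | [], rel => rel
  | s :: rest, rel => if s ∈ rel then pvPadOnce rest rel else rel ++ [s]

-- 'while len(rel) < 3': each pass appends exactly one element, so at most 3 passes run
def pvPad : Nat → List String → List String
  | 0, rel => rel
  | n + 1, rel => if rel.length < 3 then pvPad n (pvPadOnce pvSuggs rel) else rel

def get_spatial_suggestions (query : String) : List String :=
  let query_lower := PySem.Str.lower query
  let rel := pvSuggs.filter (fun s => pvMatch query_lower s)
  PySem.List.slice (pvPad 3 rel) none (some 3)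

-- ===== PORT B =====
def get_spatial_suggestions_alt (query : String) : List String :=
  let query_lower := PySem.Str.lower query
  let matched := pvSuggs.filter (fun s => pvMatch query_lower s)
  let unmatched := pvSuggs.filter (fun s => !(pvMatch query_lower s))
  PySem.List.slice (matched ++ unmatched) none (some 3)

-- ===== PRECONDITION & SPEC =====
def Spec_get_spatial_suggestions (query : String) (out : List String) : Prop := out = get_spatial_suggestions_alt query
instance (query : String) (out : List String) : Decidable (Spec_get_spatial_suggestions query out) := by unfold Spec_get_spatial_suggestions; infer_instance

-- ===== CLAIM (what is proved, stated in full; the proofs are below) =====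
def Claim_equal_get_spatial_suggestions : Prop := ∀ (query : String), Dom_get_spatial_suggestions query → Spec_get_spatial_suggestions query (get_spatial_suggestions query)

-- ===== LEMMAS AND PROOFS =====

-- The whole computation depends on query only through the six Booleans
-- pvMatch (lower query) sᵢ; case on them and both sides evaluate to literals.
theorem get_spatial_suggestions_eq (query : String) :
    get_spatial_suggestions query = get_spatial_suggestions_alt query := by
  unfold get_spatial_suggestions get_spatial_suggestions_alt
  set ql := PySem.Str.lower query with hql
  cases h1 : pvMatch ql "Show satellite data for Mumbai region" <;>
  cases h2 : pvMatch ql "What data is available around Delhi?" <;>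
  cases h3 : pvMatch ql "Show coverage within 50km of Bangalore" <;>
  cases h4 : pvMatch ql "What satellite imagery covers Chennai area?" <;>
  cases h5 : pvMatch ql "Show data availability for coordinates 77.2090, 28.7041" <;>
  cases h6 : pvMatch ql "What's the coverage area for Kolkata region?" <;>
  simp [pvSuggs, List.filter, h1, h2, h3, h4, h5, h6, pvPad, pvPadOnce, PySem.List.slice]

-- ===== VERDICT (by name: the statement is the Claim_ definition above) =====
theorem get_spatial_suggestions_spec : Claim_equal_get_spatial_suggestions := by
  intro query _
  unfold Spec_get_spatial_suggestions
  exact get_spatial_suggestions_eq query
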